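-- pv_equiv track=rewrite | github.com/Retsediv/Battleship | core.py | beauty_field
-- ===== SOURCE A (Python) =====
-- def beauty_field(board):
--     """ (list) -> (str)
--     Make beautiful board(with numbers, letters and cells)
--     """
--     board = [[str(i+1) + ("" if i+1 == 10 else " ")] + board[i] for i in range(len(board))]
--     board.insert(0, ["  ", "A", "B", "C", "D", "E", "F", "G", "H", "I", "J"])
--     for line in range(len(board)):
--         for i in range(len(board[line])):
--             board[line].insert(2*i+1, "|")
--         board[line].append("\n")
--
--     return "".join(["".join(line) for line in board])
-- ===== SOURCE B (Python) =====
-- def beauty_field(board):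
--     """ (list) -> (str)
--     Make beautiful board(with numbers, letters and cells)
--     """
--     # Build the display string back-to-front by prepending: rows from the
--     # last to the first, cells within a row from right to left, header last.
--     out = ""
--     for i in range(len(board) - 1, -1, -1):
--         row = "\n"
--         for cell in reversed(board[i]):
--             row = cell + "|" + row
--         out = str(i + 1) + ("" if i + 1 == 10 else " ") + "|" + row + out
--     hdr = "\n"
--     for letter in reversed("ABCDEFGHIJ"):
--         hdr = letter + "|" + hdr
--     return "  |" + hdr + out
-- ===== Notes on version B (the rewrite author's own statement) =====
-- stated objective: alternative
-- what changed: B builds the display string back-to-front by string prepending (rows iterated last-to-first, cells right-to-left, header prepended at the end), with no 2D token matrix and no insert-at-2*i+1 separator pass as in A.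
import Mathlib
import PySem

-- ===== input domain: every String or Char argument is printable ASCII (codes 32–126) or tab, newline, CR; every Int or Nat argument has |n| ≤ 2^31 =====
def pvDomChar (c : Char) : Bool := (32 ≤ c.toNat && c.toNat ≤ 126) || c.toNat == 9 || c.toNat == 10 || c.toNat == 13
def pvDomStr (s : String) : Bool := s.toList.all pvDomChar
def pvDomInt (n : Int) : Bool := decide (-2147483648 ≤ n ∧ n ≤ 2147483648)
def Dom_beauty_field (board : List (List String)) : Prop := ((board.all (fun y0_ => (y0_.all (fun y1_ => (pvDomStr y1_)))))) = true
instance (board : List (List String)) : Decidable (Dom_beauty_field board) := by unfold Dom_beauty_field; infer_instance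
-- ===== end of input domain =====

-- B builds the display string back-to-front by prepending (rows last-to-first, cells right-to-left,
-- header last) instead of A's 2D token matrix with "|" inserted at positions 2*i+1 (objective:
-- alternative; neither version mutates its argument).

-- ===== PORT A =====
-- the inner loop 'for i in range(len(board[line])): board[line].insert(2*i+1, "|")'
def pvInterleave (line : List String) : List String :=
  (List.range line.length).foldl (fun acc (i : Nat) => PySem.List.insert acc (2 * (i : Int) + 1) "|") line

def beauty_field (board : List (List String)) : String :=
  let board1 := (List.range board.length).map (fun (i : Nat) =>
    (PySem.Int.toStr ((i : Int) + 1) ++ (if (i : Int) + 1 == 10 then "" else " ")) :: board.getD i [])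
  let board2 := ["  ", "A", "B", "C", "D", "E", "F", "G", "H", "I", "J"] :: board1
  let board3 := board2.map (fun line => pvInterleave line ++ ["\n"])
  PySem.Str.join "" (board3.map (fun line => PySem.Str.join "" line))

-- ===== PORT B =====
-- 'for i in range(len(board)-1, -1, -1)' / 'for cell in reversed(board[i])' / 'for letter in reversed("ABCDEFGHIJ")'
def beauty_field_alt (board : List (List String)) : String :=
  let out := (List.range board.length).reverse.foldl (fun out (i : Nat) =>
    PySem.Int.toStr ((i : Int) + 1) ++ (if (i : Int) + 1 == 10 then "" else " ") ++ "|" ++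
      ((board.getD i []).reverse.foldl (fun row cell => cell ++ "|" ++ row) "\n") ++ out) ""
  let hdr := ("ABCDEFGHIJ".toList).reverse.foldl (fun hdr c => String.singleton c ++ "|" ++ hdr) "\n"
  "  |" ++ hdr ++ out

-- ===== PRECONDITION & SPEC =====
def Spec_beauty_field (board : List (List String)) (out : String) : Prop := out = beauty_field_alt board
instance (board : List (List String)) (out : String) : Decidable (Spec_beauty_field board out) := by unfold Spec_beauty_field; infer_instance

-- ===== CLAIM (what is proved, stated in full; the proofs are below) =====
def Claim_equal_beauty_field : Prop := ∀ (board : List (List String)), Dom_beauty_field board → Spec_beauty_field board (beauty_field board)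

-- ===== LEMMAS AND PROOFS =====

-- A's insert-at-2*i+1 loop appends a "|" after every token
theorem pvInterleave_aux (todo : List String) : ∀ (pre : List String) (k : Nat), pre.length = 2 * k →
    (List.range' k todo.length).foldl (fun acc (i : Nat) => PySem.List.insert acc (2 * (i : Int) + 1) "|") (pre ++ todo)
      = pre ++ todo.flatMap (fun t => [t, "|"]) := by
  induction todo with
  | nil => intro pre k h; simp
  | cons t ts ih =>
    intro pre k h
    have hins : PySem.List.insert (pre ++ t :: ts) (2 * (k : Int) + 1) "|"
        = (pre ++ [t, "|"]) ++ ts := by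
      have h1 : ((2 * k + 1 : Nat) : Int) = 2 * (k : Int) + 1 := by push_cast; ring
      rw [← h1, PySem.List.insert_natCast _ _ _
        (by simp only [List.length_append, List.length_cons, h]; omega)]
      have htake : List.take (2 * k + 1) (pre ++ t :: ts) = pre ++ [t] := by
        rw [List.take_append, List.take_of_length_le (by omega)]
        simp [h]
      have hdrop : List.drop (2 * k + 1) (pre ++ t :: ts) = ts := by
        rw [List.drop_append, List.drop_of_length_le (by omega)]
        simp [h]
      rw [htake, hdrop]; simp
    simp only [List.length_cons, List.range'_succ, List.foldl_cons]
    rw [hins]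
    have := ih (pre ++ [t, "|"]) (k + 1) (by simp [h]; ring)
    simpa using this

theorem pvInterleave_eq (line : List String) :
    pvInterleave line = line.flatMap (fun t => [t, "|"]) := by
  have := pvInterleave_aux line [] 0 (by simp)
  simpa [pvInterleave, List.range_eq_range'] using this

-- the characters of one A display line: every token followed by '|', then '\n'
theorem lineCharsA (line : List String) :
    (((pvInterleave line ++ ["\n"]).map String.toList).flatten)
      = line.flatMap (fun t => t.toList ++ ['|']) ++ ['\n'] := by
  rw [pvInterleave_eq]
  induction line with
  | nil => simp
  | cons t ts ih => simp at ih ⊢; simp [ih]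

-- ''.join = concatenation
theorem chars_join_nil_sep : ∀ ps : List (List Char), PySem.Chars.join [] ps = ps.flatten
  | [] => by simp [PySem.Chars.join_nil]
  | [p] => by simp [PySem.Chars.join_singleton]
  | p :: q :: r => by
      rw [PySem.Chars.join_cons_cons, chars_join_nil_sep (q :: r)]
      simp

-- B's inner right-to-left loop over a row's cells
theorem rowFold (cells : List String) (init : String) :
    (cells.reverse.foldl (fun row cell => cell ++ "|" ++ row) init).toList
      = cells.flatMap (fun c => c.toList ++ ['|']) ++ init.toList := by
  rw [List.foldl_reverse]
  induction cells with
  | nil => simp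
  | cons c cs ih => simp [ih]

-- B's outer bottom-up loop: prepending g i for i from n-1 down to 0
theorem outFold (g : Nat → String) (l : List Nat) (init : String) :
    (l.reverse.foldl (fun out i => g i ++ out) init).toList
      = l.flatMap (fun i => (g i).toList) ++ init.toList := by
  rw [List.foldl_reverse]
  induction l with
  | nil => simp
  | cons a as ih => simp [ih]

theorem beauty_field_eq_alt (board : List (List String)) :
    beauty_field board = beauty_field_alt board := by
  apply String.toList_inj.mp
  rw [beauty_field, beauty_field_alt]
  -- B side
  simp only [String.toList_append]
  rw [outFold (fun (i : Nat) =>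
    PySem.Int.toStr ((i : Int) + 1) ++ (if (i : Int) + 1 == 10 then "" else " ") ++ "|" ++
      (board.getD i []).reverse.foldl (fun row cell => cell ++ "|" ++ row) "\n")]
  -- A side
  simp only [PySem.Str.toList_join, chars_join_nil_sep, List.map_map, List.map_cons,
    Function.comp_def, List.flatten_cons, lineCharsA, String.toList_append, String.toList_empty]
  -- header is a closed computation on both sides
  rw [show (["  ", "A", "B", "C", "D", "E", "F", "G", "H", "I", "J"] : List String).flatMap
        (fun t => t.toList ++ ['|']) ++ ['\n']
      = ("  |" ++ (("ABCDEFGHIJ".toList).reverse.foldl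
          (fun hdr c => String.singleton c ++ "|" ++ hdr) "\n")).toList from by decide]
  rw [← List.flatMap_def]
  simp only [String.toList_append, List.append_assoc, List.append_nil]
  congr 2
  congr 1
  funext i
  rw [rowFold]
  simp [List.flatMap_cons]

-- ===== VERDICT (by name: the statement is the Claim_ definition above) =====
theorem beauty_field_spec : Claim_equal_beauty_field := by
  intro board _
  unfold Spec_beauty_field
  exact beauty_field_eq_alt board
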